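-- pv_equiv track=rewrite | github.com/roeishc/leetcode | solutions/python3/FindTheClosestPalindrome.py | half_to_palindrome
-- ===== SOURCE A (Python) =====
-- def half_to_palindrome(left: int, even: bool) -> int:
--     res = left
--     if not even:
--         left //= 10
--     while left > 0:
--         res = res * 10 + left % 10  # "append" the smallest digit of `left` to `res`
--         left //= 10
--     return res
-- ===== SOURCE B (Python) =====
-- def half_to_palindrome(left: int, even: bool) -> int:
--     # Build the palindrome textually: mirror the decimal string of `left`
--     # (dropping the middle digit when odd) and read the result back with a
--     # single Horner pass over the characters. Nonpositive inputs have no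
--     # digit string to mirror and pass through unchanged (as in the original).
--     if left <= 0:
--         return left
--     s = str(left)
--     half = s if even else s[:-1]
--     res = 0
--     for ch in s + half[::-1]:
--         res = res * 10 + ord(ch) - 48
--     return res
-- ===== Notes on version B (the rewrite author's own statement) =====
-- stated objective: idiomatic
-- what changed: Replaces the arithmetic peel-and-append digit loop with string mirroring: convert left to its decimal string, append the reversed string (minus the middle digit when odd), and read the concatenation back with one Horner pass.
import Mathlib
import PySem

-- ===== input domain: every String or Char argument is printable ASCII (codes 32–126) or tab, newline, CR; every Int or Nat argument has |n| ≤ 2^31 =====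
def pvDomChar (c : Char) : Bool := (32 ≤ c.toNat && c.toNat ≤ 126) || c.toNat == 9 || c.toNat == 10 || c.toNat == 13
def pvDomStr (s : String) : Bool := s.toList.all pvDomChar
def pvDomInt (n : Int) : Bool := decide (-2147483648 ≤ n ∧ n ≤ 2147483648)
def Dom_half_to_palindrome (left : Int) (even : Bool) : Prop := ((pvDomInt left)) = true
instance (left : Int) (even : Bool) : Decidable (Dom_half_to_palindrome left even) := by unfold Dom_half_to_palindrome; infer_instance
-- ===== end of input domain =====

-- B replaces A's arithmetic peel-and-append digit loop by string mirroring
-- (decimal string + reversed tail, read back with one Horner pass); same result, same cost.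


-- ===== PORT A =====
-- the 'while left > 0' loop: res = res*10 + left % 10; left //= 10
def hpLoop (res left : Int) : Int :=
  if h : 0 < left then
    hpLoop (res * 10 + PySem.Int.mod left 10) (PySem.Int.floordiv left 10)
  else res
termination_by left.toNat
decreasing_by
  rw [PySem.Int.floordiv_eq_ediv_of_pos (by norm_num : (0:Int) < 10)]
  omega

def half_to_palindrome (left : Int) (even : Bool) : Int :=
  hpLoop left (if even then left else PySem.Int.floordiv left 10)

-- ===== PORT B =====
def half_to_palindrome_alt (left : Int) (even : Bool) : Int :=
  if left ≤ 0 then left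
  else
    let s := PySem.Int.toChars left                               -- str(left) (character list side; exact by toList_toStr)
    let half := if even then s else PySem.List.slice s none (some (-1))   -- s[:-1]
    let pal := s ++ ((PySem.List.slice? half none none (-1)).getD [])     -- half[::-1]; step -1 ≠ 0, never none
    pal.foldl (fun res c => res * 10 + ((c.toNat : Int) - 48)) 0  -- the Horner pass (ord(ch) - 48)

-- ===== PRECONDITION & SPEC =====
def Spec_half_to_palindrome (left : Int) (even : Bool) (out : Int) : Prop := out = half_to_palindrome_alt left even
instance (left : Int) (even : Bool) (out : Int) : Decidable (Spec_half_to_palindrome left even out) := by unfold Spec_half_to_palindrome; infer_instance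

-- ===== CLAIM (what is proved, stated in full; the proofs are below) =====
def Claim_equal_half_to_palindrome : Prop := ∀ (left : Int) (even : Bool), Dom_half_to_palindrome left even → Spec_half_to_palindrome left even (half_to_palindrome left even)

-- ===== LEMMAS AND PROOFS =====

theorem hpLoop_nonpos (res left : Int) (h : left ≤ 0) : hpLoop res left = res := by
  rw [hpLoop, dif_neg (by omega)]

-- A's loop over a positive number is the Horner fold over its base-10 digits (LSD first)
theorem hpLoop_nat (n : Nat) (res : Int) :
    hpLoop res (n : Int) = (Nat.digits 10 n).foldl (fun (a : Int) (d : Nat) => a * 10 + (d : Int)) res := by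
  induction n using Nat.strong_induction_on generalizing res with
  | _ n ih =>
    rcases Nat.eq_zero_or_pos n with h0 | h0
    · subst h0
      rw [hpLoop, dif_neg (by omega)]
      simp
    · rw [hpLoop, dif_pos (by exact_mod_cast h0)]
      rw [PySem.Int.floordiv_eq_ediv_of_pos (by norm_num : (0:Int) < 10),
          PySem.Int.mod_eq_emod_of_pos (by norm_num : (0:Int) < 10)]
      have hdiv : ((n : Int)) / 10 = ((n / 10 : Nat) : Int) := by omega
      have hmod : ((n : Int)) % 10 = ((n % 10 : Nat) : Int) := by omega
      rw [hdiv, hmod, ih (n / 10) (by omega)]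
      rw [Nat.digits_def' (by norm_num : 1 < 10) h0]
      rfl

theorem digitChar_toNat (d : Nat) (h : d < 10) : (Nat.digitChar d).toNat = d + 48 := by
  interval_cases d <;> rfl

-- core's toDigitsCore, on a positive number with enough fuel, is the reversed digit list rendered to chars
theorem toDigitsCore_eq (f : Nat) : ∀ (n : Nat) (ds : List Char), 0 < n → n < 10 ^ f →
    Nat.toDigitsCore 10 f n ds = ((Nat.digits 10 n).map Nat.digitChar).reverse ++ ds := by
  induction f with
  | zero => intro n ds h0 hf; omega
  | succ f ih =>
    intro n ds h0 hf
    rw [Nat.toDigitsCore]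
    rcases Nat.eq_zero_or_pos (n / 10) with hq | hq
    · rw [if_pos hq]
      rw [Nat.digits_def' (by norm_num : 1 < 10) h0, hq]
      simp
    · rw [if_neg (by omega)]
      rw [ih (n / 10) _ hq (by { have : 10 * (n / 10) ≤ n := Nat.mul_div_le n 10; omega })]
      rw [Nat.digits_def' (by norm_num : 1 < 10) h0]
      simp

theorem toDigits_eq (n : Nat) (h0 : 0 < n) :
    Nat.toDigits 10 n = ((Nat.digits 10 n).map Nat.digitChar).reverse := by
  rw [Nat.toDigits, toDigitsCore_eq (n + 1) n [] h0]
  · simp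
  · calc n < 10 ^ n := Nat.lt_pow_self (by norm_num)
      _ ≤ 10 ^ (n + 1) := Nat.pow_le_pow_right (by norm_num) (by omega)

-- rendering digits to chars commutes with the Horner fold
theorem foldl_map_digitChar (ds : List Nat) (h : ∀ d ∈ ds, d < 10) (a : Int) :
    (ds.map Nat.digitChar).foldl (fun res c => res * 10 + ((c.toNat : Int) - 48)) a
      = ds.foldl (fun (res : Int) (d : Nat) => res * 10 + (d : Int)) a := by
  induction ds generalizing a with
  | nil => rfl
  | cons d t iht =>
    simp only [List.map_cons, List.foldl_cons]
    rw [digitChar_toNat d (h d (List.mem_cons_self))]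
    have : a * 10 + (((d + 48 : Nat) : Int) - 48) = a * 10 + (d : Int) := by push_cast; ring
    rw [this]
    exact iht (fun x hx => h x (List.mem_cons_of_mem _ hx)) _

-- Horner over the MSD-first (reversed) digit list recovers the number
set_option maxRecDepth 4096 in
theorem rev_digits_foldl (n : Nat) : ∀ (a : Int),
    (Nat.digits 10 n).reverse.foldl (fun (res : Int) (d : Nat) => res * 10 + (d : Int)) a
      = a * 10 ^ (Nat.digits 10 n).length + n := by
  induction n using Nat.strong_induction_on with
  | _ n ih =>
    intro a
    rcases Nat.eq_zero_or_pos n with h0 | h0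
    · subst h0
      simp only [Nat.digits_zero, List.reverse_nil, List.foldl_nil, List.length_nil,
        pow_zero, Nat.cast_zero, mul_one, add_zero]
    · rw [Nat.digits_def' (by norm_num : 1 < 10) h0]
      simp only [List.reverse_cons, List.foldl_append, List.foldl_cons, List.foldl_nil,
        List.length_cons]

      rw [ih (n / 10) (Nat.div_lt_self h0 (by norm_num)) a]
      have hsplit : ((n : Nat) : Int) = 10 * ((n / 10 : Nat) : Int) + ((n % 10 : Nat) : Int) := by
        exact_mod_cast (Nat.div_add_mod n 10).symm
      rw [pow_succ, hsplit]
      ring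

theorem dropLast_reverse_eq {α : Type} (l : List α) : l.reverse.dropLast = l.tail.reverse := by
  cases l with
  | nil => rfl
  | cons x t => simp [List.reverse_cons]

-- ===== VERDICT (by name: the statement is the Claim_ definition above) =====
theorem half_to_palindrome_spec : Claim_equal_half_to_palindrome := by
  intro left even _
  unfold Spec_half_to_palindrome half_to_palindrome half_to_palindrome_alt
  by_cases hle : left ≤ 0
  · rw [if_pos hle]
    have harg : (if even then left else PySem.Int.floordiv left 10) ≤ 0 := by
      cases even
      · rw [if_neg (by simp)]
        rw [PySem.Int.floordiv_eq_ediv_of_pos (by norm_num : (0:Int) < 10)]; omega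
      · rw [if_pos rfl]; exact hle
    exact hpLoop_nonpos _ _ harg
  · rw [if_neg hle]
    obtain ⟨n, rfl⟩ : ∃ n : Nat, left = (n : Int) := ⟨left.toNat, by omega⟩
    have h0 : 0 < n := by omega
    simp only [PySem.List.slice?_none_none_neg_one, Option.getD_some]
    have hs : PySem.Int.toChars (n : Int) = List.map Nat.digitChar (Nat.digits 10 n).reverse := by
      rw [PySem.Int.toChars, if_neg (by omega)]
      simp only [Int.toNat_natCast]
      rw [toDigits_eq n h0, List.map_reverse]
    rw [hs]
    have hlt : ∀ d ∈ (Nat.digits 10 n).reverse, d < 10 :=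
      fun d hd => Nat.digits_lt_base (by norm_num) (List.mem_reverse.mp hd)
    rw [List.foldl_append, foldl_map_digitChar _ hlt 0, rev_digits_foldl n 0]
    simp only [zero_mul, zero_add]
    cases even with
    | true =>
      rw [if_pos rfl, if_pos rfl]
      have heven : (List.map Nat.digitChar (Nat.digits 10 n).reverse).reverse
          = List.map Nat.digitChar (Nat.digits 10 n) := by simp
      rw [heven,
        foldl_map_digitChar _ (fun d hd => Nat.digits_lt_base (by norm_num) hd)]
      rw [hpLoop_nat n]
    | false =>
      rw [if_neg (by simp), if_neg (by simp)]
      rw [PySem.List.slice_to_neg_one]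
      have hodd : (List.map Nat.digitChar (Nat.digits 10 n).reverse).dropLast.reverse
          = List.map Nat.digitChar (Nat.digits 10 n).tail := by
        rw [List.map_reverse, dropLast_reverse_eq, List.reverse_reverse]
        simp
      rw [hodd,
        foldl_map_digitChar _
          (fun d hd => Nat.digits_lt_base (by norm_num) (List.mem_of_mem_tail hd))]
      have htail : (Nat.digits 10 n).tail = Nat.digits 10 (n / 10) := by
        rw [Nat.digits_def' (by norm_num : 1 < 10) h0]
        rfl
      rw [htail]

      have hfd : PySem.Int.floordiv (n : Int) 10 = ((n / 10 : Nat) : Int) := by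
        rw [PySem.Int.floordiv_eq_ediv_of_pos (by norm_num : (0:Int) < 10)]; omega
      rw [hfd, hpLoop_nat (n / 10)]
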